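-- pv_equiv track=rewrite | github.com/jboner/emacs-config | VCode/Mediator/util.py | remove_occurences_from_list
-- ===== SOURCE A (Python) =====
-- def remove_occurences_from_list(item, list, max_occurs=None):
--    num_found = 0
--    new_list = []
--    ii = 0
--    for ii in range(len(list)):
--       if list[ii] == item:
--          num_found = num_found + 1
--          if max_occurs != None and num_found >= max_occurs:
--             break
--       else:
--          new_list.append(list[ii])
--
--    ii_rest = ii + 1
--    if ii_rest < len(list):
--       new_list = new_list + list[ii_rest:]
--
--
--    return new_list
-- ===== SOURCE B (Python) =====
-- def remove_occurences_from_list(item, list, max_occurs=None):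
--    if max_occurs is None:
--       return [x for x in list if x != item]
--    cut = None
--    found = 0
--    for i, x in enumerate(list):
--       if x == item:
--          found += 1
--          if found >= max_occurs:
--             cut = i
--             break
--    if cut is None:
--       return [x for x in list if x != item]
--    return [x for x in list[:cut] if x != item] + list[cut+1:]
-- ===== Notes on version B (the rewrite author's own statement) =====
-- stated objective: simpler
-- what changed: A interleaves counting and accumulation in one loop that appends non-matching elements and then patches on the tail; B first only locates the cut index (where the running match count reaches max_occurs), then builds the result as a filter comprehension of the prefix plus the verbatim tail, with the max_occurs=None case a single filter comprehension.
import Mathlib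
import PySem

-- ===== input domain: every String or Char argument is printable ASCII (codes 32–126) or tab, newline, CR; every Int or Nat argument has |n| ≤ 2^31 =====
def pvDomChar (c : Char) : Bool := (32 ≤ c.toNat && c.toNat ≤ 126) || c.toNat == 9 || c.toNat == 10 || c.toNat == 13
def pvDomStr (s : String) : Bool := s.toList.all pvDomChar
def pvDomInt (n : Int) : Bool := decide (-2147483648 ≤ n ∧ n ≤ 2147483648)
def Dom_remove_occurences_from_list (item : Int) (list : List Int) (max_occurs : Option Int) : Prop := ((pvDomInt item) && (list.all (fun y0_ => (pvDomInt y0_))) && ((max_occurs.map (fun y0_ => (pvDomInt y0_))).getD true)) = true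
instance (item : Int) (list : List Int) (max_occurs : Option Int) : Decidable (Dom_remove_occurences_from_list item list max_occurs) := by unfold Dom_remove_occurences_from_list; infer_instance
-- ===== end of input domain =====

-- B replaces A's single accumulate-and-break loop by: locate the break index first, then
-- build the result as filtered prefix ++ verbatim tail (objective: simpler decomposition).

-- ===== PORT A =====
-- A's for-loop: walks the list keeping (num_found, new_list); returns (break index if the
-- loop broke, accumulated new_list). `ii` is the absolute index of the current element.
def pvA_loop (item : Int) (mo : Option Int) (rest : List Int) (ii : Nat) (nf : Int)
    (acc : List Int) : Option Nat × List Int :=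
  match rest with
  | [] => (none, acc)
  | x :: rs =>
    if x = item then
      let nf' := nf + 1
      match mo with
      | some m => if nf' ≥ m then (some ii, acc) else pvA_loop item mo rs (ii + 1) nf' acc
      | none => pvA_loop item mo rs (ii + 1) nf' acc
    else
      pvA_loop item mo rs (ii + 1) nf (acc ++ [x])

def remove_occurences_from_list (item : Int) (list : List Int) (max_occurs : Option Int) : List Int :=
  let r := pvA_loop item max_occurs list 0 0 []
  -- Python's `for ii in range(len(list))` leaves ii = break index, else len-1 (0 if empty)
  let iiF : Nat := match r.1 with
    | some k => k
    | none => if list.length > 0 then list.length - 1 else 0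
  let ii_rest := iiF + 1
  if ii_rest < list.length then r.2 ++ list.drop ii_rest else r.2

-- ===== PORT B =====
-- first pass: only LOCATE the cut index (first index where the running count reaches m)
def pvB_cut (item : Int) (m : Int) (rest : List Int) (i : Nat) (found : Int) : Option Nat :=
  match rest with
  | [] => none
  | x :: rs =>
    if x = item then
      if found + 1 ≥ m then some i else pvB_cut item m rs (i + 1) (found + 1)
    else
      pvB_cut item m rs (i + 1) found

def remove_occurences_from_list_alt (item : Int) (list : List Int) (max_occurs : Option Int) : List Int :=
  match max_occurs with
  | none => list.filter (fun x => x ≠ item)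
  | some m =>
    match pvB_cut item m list 0 0 with
    | none => list.filter (fun x => x ≠ item)
    | some c => (list.take c).filter (fun x => x ≠ item) ++ list.drop (c + 1)

-- ===== PRECONDITION & SPEC =====
def Spec_remove_occurences_from_list (item : Int) (list : List Int) (max_occurs : Option Int) (out : List Int) : Prop := out = remove_occurences_from_list_alt item list max_occurs
instance (item : Int) (list : List Int) (max_occurs : Option Int) (out : List Int) : Decidable (Spec_remove_occurences_from_list item list max_occurs out) := by unfold Spec_remove_occurences_from_list; infer_instance

-- ===== CLAIM (what is proved, stated in full; the proofs are below) =====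
def Claim_equal_remove_occurences_from_list : Prop := ∀ (item : Int) (list : List Int) (max_occurs : Option Int), Dom_remove_occurences_from_list item list max_occurs → Spec_remove_occurences_from_list item list max_occurs (remove_occurences_from_list item list max_occurs)

-- ===== LEMMAS AND PROOFS =====

lemma pvA_loop_none (item : Int) (l : List Int) (ii : Nat) (nf : Int) (acc : List Int) :
    pvA_loop item none l ii nf acc = (none, acc ++ l.filter (fun x => x ≠ item)) := by
  induction l generalizing ii nf acc with
  | nil => simp [pvA_loop]
  | cons x rs ih =>
    by_cases hx : x = item <;> simp [pvA_loop, hx, ih]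

lemma pvB_cut_ge (item m : Int) (l : List Int) (i : Nat) (found : Int) (c : Nat)
    (h : pvB_cut item m l i found = some c) : i ≤ c := by
  induction l generalizing i found with
  | nil => simp [pvB_cut] at h
  | cons x rs ih =>
    simp only [pvB_cut] at h
    split_ifs at h with h1 h2
    · simp at h; omega
    · exact le_trans (by omega) (ih _ _ h)
    · exact le_trans (by omega) (ih _ _ h)

lemma pvB_cut_lt (item m : Int) (l : List Int) (i : Nat) (found : Int) (c : Nat)
    (h : pvB_cut item m l i found = some c) : c < i + l.length := by
  induction l generalizing i found with
  | nil => simp [pvB_cut] at h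
  | cons x rs ih =>
    simp only [pvB_cut] at h
    split_ifs at h with h1 h2
    · simp at h; subst h; simp
    · have := ih _ _ h; simp; omega
    · have := ih _ _ h; simp; omega

lemma pvA_loop_some (item m : Int) (l : List Int) (ii : Nat) (nf : Int) (acc : List Int) :
    pvA_loop item (some m) l ii nf acc =
      match pvB_cut item m l ii nf with
      | none => (none, acc ++ l.filter (fun x => x ≠ item))
      | some c => (some c, acc ++ (l.take (c - ii)).filter (fun x => x ≠ item)) := by
  induction l generalizing ii nf acc with
  | nil => simp [pvA_loop, pvB_cut]
  | cons x rs ih =>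
    by_cases hx : x = item
    · by_cases hm : nf + 1 ≥ m
      · simp [pvA_loop, pvB_cut, hx, hm]
      · simp only [pvA_loop, pvB_cut, hx, if_neg hm, ge_iff_le]
        rw [ih]
        cases hc : pvB_cut item m rs (ii + 1) (nf + 1) with
        | none => simp [List.filter_cons, hx]
        | some c =>
          have hge := pvB_cut_ge item m rs (ii + 1) (nf + 1) c hc
          have : c - ii = (c - (ii + 1)) + 1 := by omega
          simp [this, List.filter_cons, hx]
    · simp only [pvA_loop, pvB_cut, if_neg hx]
      rw [ih]
      cases hc : pvB_cut item m rs (ii + 1) nf with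
      | none => simp [List.filter_cons, hx]
      | some c =>
        have hge := pvB_cut_ge item m rs (ii + 1) nf c hc
        have : c - ii = (c - (ii + 1)) + 1 := by omega
        simp [this, List.filter_cons, hx]

-- ===== VERDICT (by name: the statement is the Claim_ definition above) =====
theorem remove_occurences_from_list_spec : Claim_equal_remove_occurences_from_list := by
  intro item l mo _
  unfold Spec_remove_occurences_from_list remove_occurences_from_list remove_occurences_from_list_alt
  cases mo with
  | none =>
    rw [pvA_loop_none]
    simp only []
    split_ifs with h1 h2 <;> simp_all <;> omega
  | some m =>
    cases hc : pvB_cut item m l 0 0 with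
    | none =>
      simp only [pvA_loop_some, hc]
      split_ifs with h1 h2 <;> simp_all <;> omega
    | some c =>
      have hlt := pvB_cut_lt item m l 0 0 c hc
      simp only [pvA_loop_some, hc, Nat.sub_zero]
      split_ifs with h
      · simp
      · have hdrop : l.drop (c + 1) = [] := List.drop_eq_nil_of_le (by omega)
        simp [hdrop]
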